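-- pv_equiv track=rewrite | github.com/mochilang/mochi | tests/leetcode/x/python/0282.py | solve
-- ===== SOURCE A (Python) =====
-- def solve(num, target):
--     ans = []
--
--     def dfs(i, expr, value, last):
--         if i == len(num):
--             if value == target:
--                 ans.append(expr)
--             return
--         for j in range(i, len(num)):
--             if j > i and num[i] == "0":
--                 break
--             s = num[i : j + 1]
--             n = int(s)
--             if i == 0:
--                 dfs(j + 1, s, n, n)
--             else:
--                 dfs(j + 1, expr + "+" + s, value + n, n)
--                 dfs(j + 1, expr + "-" + s, value - n, -n)
--                 dfs(j + 1, expr + "*" + s, value - last + last * n, last * n)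
--
--     dfs(0, "", 0, 0)
--     ans.sort()
--     return ans
-- ===== SOURCE B (Python) =====
-- def solve(num, target):
--     # Iterative backtracking: explicit stack of (i, expr, value, last) states
--     # replaces A's recursive DFS; children are pushed reversed so pop order is
--     # the natural left-to-right exploration.  Final sort as in A.
--     ans = []
--     L = len(num)
--     stack = [(0, "", 0, 0)]
--     while stack:
--         i, expr, value, last = stack.pop()
--         if i == L:
--             if value == target:
--                 ans.append(expr)
--             continue
--         pending = []
--         for j in range(i, L):
--             if j > i and num[i] == "0":
--                 break
--             s = num[i:j + 1]
--             n = int(s)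
--             if i == 0:
--                 pending.append((j + 1, s, n, n))
--             else:
--                 pending.append((j + 1, expr + "+" + s, value + n, n))
--                 pending.append((j + 1, expr + "-" + s, value - n, -n))
--                 pending.append((j + 1, expr + "*" + s, value - last + last * n, last * n))
--         stack.extend(reversed(pending))
--     ans.sort()
--     return ans
-- ===== Notes on version B (the rewrite author's own statement) =====
-- stated objective: alternative
-- what changed: Replaced the nested recursive DFS with an iterative backtracking loop over an explicit stack of (i, expr, value, last) states (children pushed reversed so pop order is the natural left-to-right exploration), keeping the final sort.
import Mathlib
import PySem

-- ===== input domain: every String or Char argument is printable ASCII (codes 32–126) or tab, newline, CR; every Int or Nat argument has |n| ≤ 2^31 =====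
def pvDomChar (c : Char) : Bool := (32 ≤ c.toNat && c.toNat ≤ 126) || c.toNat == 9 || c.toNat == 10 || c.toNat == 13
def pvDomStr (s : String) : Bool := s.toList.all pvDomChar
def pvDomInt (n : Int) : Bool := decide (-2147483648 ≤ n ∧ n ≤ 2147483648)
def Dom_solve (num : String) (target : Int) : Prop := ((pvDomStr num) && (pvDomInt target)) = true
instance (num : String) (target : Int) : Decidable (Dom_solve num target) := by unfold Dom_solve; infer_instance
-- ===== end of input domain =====

-- B replaces A's recursive DFS by an iterative backtracking loop over an explicit
-- stack of (i, expr, value, last) states (objective: alternative decomposition, same cost).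

-- int(s) for the digit substrings; exact inside Pre_solve (all-digit num), where ofChars? is some
def pvStrToInt (cs : List Char) : Int := (PySem.Int.ofChars? cs).getD 0

-- termination measures for the ports (named so the proofs inside the definitions stay tiny)
theorem pvDecSub (L j : Nat) (h : j < L) : L - (j + 1) < L - j := by omega
theorem pvDecA1 (L i : Nat) (_h : ¬ i = L) : 2 * (L + 1 - i) < 2 * (L + 1 - i) + 1 := by omega
theorem pvDecA2 (L _i j : Nat) (h : j < L) : 2 * (L + 1 - (j + 1)) + 1 < 2 * (L + 1 - j) := by
  omega
theorem pvDecA3 (L _i j : Nat) (h : j < L) : 2 * (L + 1 - (j + 1)) < 2 * (L + 1 - j) := by omega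

-- ===== PORT A =====
mutual
-- the nested recursive dfs of A (returns the list of expressions it appends, in order)
def dfsA (cs : List Char) (target : Int) (i : Nat) (expr : String) (value last : Int) :
    List String :=
  if i = cs.length then
    (if value = target then [expr] else [])
  else
    loopA cs target i expr value last i
termination_by (2 * (cs.length + 1 - i) + 1)
decreasing_by exact pvDecA1 cs.length i (by assumption)
-- the `for j in range(i, len(num))` loop of dfs, with the leading-zero break
def loopA (cs : List Char) (target : Int) (i : Nat) (expr : String) (value last : Int)
    (j : Nat) : List String :=
  if _h : j < cs.length then
    if j > i ∧ cs.getD i ' ' = '0' then []   -- break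
    else
      let s := String.ofList (PySem.List.slice cs (some (i : Int)) (some ((j : Int) + 1)))
      let n := pvStrToInt s.toList
      (if i = 0 then dfsA cs target (j + 1) s n n
       else
         dfsA cs target (j + 1) (expr ++ "+" ++ s) (value + n) n ++
         dfsA cs target (j + 1) (expr ++ "-" ++ s) (value - n) (-n) ++
         dfsA cs target (j + 1) (expr ++ "*" ++ s) (value - last + last * n) (last * n)) ++
      loopA cs target i expr value last (j + 1)
  else []
termination_by (2 * (cs.length + 1 - j))
decreasing_by
· exact pvDecA2 cs.length i j (by assumption)
· exact pvDecA2 cs.length i j (by assumption)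
· exact pvDecA2 cs.length i j (by assumption)
· exact pvDecA2 cs.length i j (by assumption)
· exact pvDecA3 cs.length i j (by assumption)
end

def solve (num : String) (target : Int) : List String :=
  PySem.List.sorted (dfsA num.toList target 0 "" 0 0) (fun s => s) false

-- ===== PORT B =====
-- the `pending` list built by B's inner for-loop (children of one popped state)
def expandB (cs : List Char) (i : Nat) (expr : String) (value last : Int) (j : Nat) :
    List (Nat × String × Int × Int) :=
  if _h : j < cs.length then
    if j > i ∧ cs.getD i ' ' = '0' then []   -- break
    else
      let s := String.ofList (PySem.List.slice cs (some (i : Int)) (some ((j : Int) + 1)))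
      let n := pvStrToInt s.toList
      (if i = 0 then [(j + 1, s, n, n)]
       else
         [(j + 1, expr ++ "+" ++ s, value + n, n),
          (j + 1, expr ++ "-" ++ s, value - n, -n),
          (j + 1, expr ++ "*" ++ s, value - last + last * n, last * n)]) ++
      expandB cs i expr value last (j + 1)
  else []
termination_by cs.length - j
decreasing_by exact pvDecSub cs.length j (by assumption)

-- B's while-loop, with a fuel counter making it total (one unit per pop; the fuel
-- solve_alt passes is an upper bound on the number of pops, proved below).
-- Lean list head = Python stack top, so `stack.extend(reversed(pending))` followed
-- by pops is `pending ++ rest`.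
def runB (cs : List Char) (target : Int) :
    Nat → List (Nat × String × Int × Int) → List String → List String
  | 0, _, ans => ans
  | _ + 1, [], ans => ans
  | fuel + 1, (i, expr, value, last) :: rest, ans =>
    if i = cs.length then
      runB cs target fuel rest (if value = target then ans ++ [expr] else ans)
    else
      runB cs target fuel (expandB cs i expr value last i ++ rest) ans

def solve_alt (num : String) (target : Int) : List String :=
  PySem.List.sorted
    (runB num.toList target (4 ^ (num.toList.length + 1) + 1) [(0, "", 0, 0)] [])
    (fun s => s) false

-- ===== PRECONDITION & SPEC =====
-- Pre_ excludes exactly the inputs where Python A raises ValueError: any non-digit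
-- character in num is eventually the start of a single-character token fed to int().
def Pre_solve (num : String) (_target : Int) : Prop :=
  (num.toList.all fun c => '0' ≤ c && c ≤ '9') = true
instance (num : String) (target : Int) : Decidable (Pre_solve num target) := by
  unfold Pre_solve; infer_instance

def pvWitness_solve : String × Int := ("105", 5)

def Spec_solve (num : String) (target : Int) (out : List String) : Prop := out = solve_alt num target
instance (num : String) (target : Int) (out : List String) : Decidable (Spec_solve num target out) := by unfold Spec_solve; infer_instance

-- ===== CLAIM (what is proved, stated in full; the proofs are below) =====
def Claim_equal_solve : Prop := ∀ (num : String) (target : Int), Dom_solve num target → Pre_solve num target → Spec_solve num target (solve num target)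

-- ===== LEMMAS AND PROOFS =====

-- stack measure for the while-loop's termination: 4^(L+1-i) per pending state
def pvWt (L i : Nat) : Nat := 4 ^ (L + 1 - i)
def pvMsum (L : Nat) (st : List (Nat × String × Int × Int)) : Nat :=
  (st.map (fun q => pvWt L q.1)).sum

theorem pvMsum_append (L : Nat) (a b : List (Nat × String × Int × Int)) :
    pvMsum L (a ++ b) = pvMsum L a + pvMsum L b := by
  simp [pvMsum]

theorem pvMsum_expandB (cs : List Char) (i : Nat) (expr : String) (value last : Int)
    (j : Nat) :
    pvMsum cs.length (expandB cs i expr value last j) ≤ 4 ^ (cs.length + 1 - j) - 4 := by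
  by_cases h : j < cs.length
  · rw [expandB]
    simp only [h, dif_pos]
    split
    · simp [pvMsum]
    · have ih := pvMsum_expandB cs i expr value last (j + 1)
      have hL : cs.length + 1 - (j + 1) = cs.length - j := by omega
      rw [hL] at ih
      have hpow : 4 ^ (cs.length + 1 - j) = 4 * 4 ^ (cs.length - j) := by
        have h1 : cs.length + 1 - j = (cs.length - j) + 1 := by omega
        rw [h1, pow_succ]; ring
      rw [pvMsum_append]
      have hpend : ∀ s1 s2 s3 s4 : String, ∀ n v2 l2 v3 l3 v4 l4 : Int,
          pvMsum cs.length (if i = 0 then [(j + 1, s1, n, n)]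
            else [(j + 1, s2, v2, l2), (j + 1, s3, v3, l3), (j + 1, s4, v4, l4)])
            ≤ 3 * 4 ^ (cs.length - j) := by
        intro s1 s2 s3 s4 n v2 l2 v3 l3 v4 l4
        split
        · simp [pvMsum, pvWt, hL]
        · simp [pvMsum, pvWt, hL]
          omega
      refine le_trans (Nat.add_le_add (hpend _ _ _ _ _ _ _ _ _ _ _) ih) ?_
      have h4 : (4:Nat) ^ 1 ≤ 4 ^ (cs.length - j) := Nat.pow_le_pow_right (by norm_num) (by omega)
      norm_num at h4
      rw [hpow]
      omega
  · rw [expandB]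
    simp [h, pvMsum]
termination_by cs.length - j

-- result of one dfs call, as a function of a stack state
def pvRes (cs : List Char) (target : Int) (q : Nat × String × Int × Int) : List String :=
  dfsA cs target q.1 q.2.1 q.2.2.1 q.2.2.2

-- A's inner loop equals the flattened dfs-results of B's pending list
theorem loopA_expandB (cs : List Char) (target : Int) :
    ∀ (fuel i : Nat) (expr : String) (value last : Int) (j : Nat),
      cs.length ≤ j + fuel →
      loopA cs target i expr value last j =
        ((expandB cs i expr value last j).map (pvRes cs target)).flatten := by
  intro fuel
  induction fuel with
  | zero =>
    intro i expr value last j hle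
    rw [loopA, expandB]
    have h : ¬ j < cs.length := by omega
    simp [h]
  | succ n ih =>
    intro i expr value last j hle
    rw [loopA, expandB]
    by_cases h : j < cs.length
    · simp only [h, dif_pos]
      split
      · simp
      · rw [ih i expr value last (j + 1) (by omega)]
        split
        · simp [pvRes]
        · simp [pvRes, List.append_assoc]
    · simp [h]
  
-- B's stack loop, given fuel exceeding the stack measure, accumulates exactly the
-- dfs results of the stacked states, in order
theorem runB_eq (cs : List Char) (target : Int) :
    ∀ (fuel : Nat) (st : List (Nat × String × Int × Int)) (ans : List String),
      pvMsum cs.length st < fuel →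
      runB cs target fuel st ans = ans ++ (st.map (pvRes cs target)).flatten := by
  intro fuel
  induction fuel with
  | zero => intro st ans h; omega
  | succ fuel ih =>
    intro st ans hlt
    match st with
    | [] => simp [runB]
    | (i, expr, value, last) :: rest =>
      have hw : (1:Nat) ≤ pvWt cs.length i := Nat.one_le_pow _ _ (by norm_num)
      by_cases hi : i = cs.length
      · have hb : pvMsum cs.length rest < fuel := by
          simp only [pvMsum, List.map, List.sum_cons] at hlt
          simp only [pvMsum]
          omega
        simp only [runB]
        rw [if_pos hi, ih rest _ hb]
        subst hi
        have hd : pvRes cs target (cs.length, expr, value, last) =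
            if value = target then [expr] else [] := by
          rw [pvRes, dfsA]; simp
        simp only [List.map, List.flatten_cons, hd]
        split <;> simp
      · have h1 := pvMsum_expandB cs i expr value last i
        have hb : pvMsum cs.length (expandB cs i expr value last i ++ rest) < fuel := by
          rw [pvMsum_append]
          simp only [pvMsum, pvWt, List.map, List.sum_cons] at hlt h1 hw ⊢
          omega
        simp only [runB]
        rw [if_neg hi, ih _ _ hb]
        simp only [List.map_append, List.flatten_append, List.map, List.flatten_cons]
        have hd : pvRes cs target (i, expr, value, last) =
            ((expandB cs i expr value last i).map (pvRes cs target)).flatten := by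
          rw [pvRes]
          rw [dfsA]
          rw [if_neg hi]
          exact loopA_expandB cs target cs.length i expr value last i (by omega)
        rw [hd]

-- ===== VERDICT (by name: the statement is the Claim_ definition above) =====
theorem solve_spec : Claim_equal_solve := by
  intro num target _ _
  unfold Spec_solve solve solve_alt
  have hb : pvMsum num.toList.length [(0, "", 0, 0)] < 4 ^ (num.toList.length + 1) + 1 := by
    simp [pvMsum, pvWt]
  rw [runB_eq num.toList target _ _ _ hb]
  simp [pvRes]
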